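-- pv_equiv track=rewrite | github.com/daniel-reich/ubiquitous-fiesta | D6XfxhRobdQvbKX4v_20.py | first_before_second
-- ===== SOURCE A (Python) =====
-- def first_before_second(s, first, second):
--   found_first= False
--   found_second = False
--   for letter in s:
--     if not found_first:
--       if letter == second:
--         return False
--       if(letter == first):
--         found_first= True
--     else:
--       if not found_second:
--         if(letter == second):
--           found_second = True
--       else:
--         if(letter== first):
--           return False;
--   return True
-- ===== SOURCE B (Python) =====
-- def first_before_second(s, first, second):
--     chars = list(s)
--     if second not in chars:
--         return True
--     if first not in chars:
--         return False
--     last_first = len(chars) - 1 - chars[::-1].index(first)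
--     return last_first < chars.index(second)
-- ===== Notes on version B (the rewrite author's own statement) =====
-- stated objective: simpler
-- what changed: A's single-pass three-state machine is replaced by two membership tests plus a closed-form comparison: the last index of `first` (via a reversed-list index) must be strictly below the first index of `second`.
import Mathlib
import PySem

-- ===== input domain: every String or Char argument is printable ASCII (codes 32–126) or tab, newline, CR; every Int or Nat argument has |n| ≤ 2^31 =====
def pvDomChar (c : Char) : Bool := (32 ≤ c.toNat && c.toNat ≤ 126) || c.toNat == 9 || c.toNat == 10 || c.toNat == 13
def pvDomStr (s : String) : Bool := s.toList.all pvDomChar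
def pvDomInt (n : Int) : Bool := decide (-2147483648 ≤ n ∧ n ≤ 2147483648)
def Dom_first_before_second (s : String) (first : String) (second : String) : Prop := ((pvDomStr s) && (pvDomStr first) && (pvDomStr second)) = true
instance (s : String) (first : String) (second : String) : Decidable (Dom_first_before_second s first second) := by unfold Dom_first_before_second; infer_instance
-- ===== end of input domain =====

-- B replaces A's single-pass three-state machine by membership checks plus a closed-form
-- comparison of the last index of `first` with the first index of `second` (objective: simpler).

-- ===== PORT A =====
-- the for-loop over the letters of s, with the two flags as the loop state; `return` = stopping the recursion
def fbsLoop (first second : String) : List Char → Bool → Bool → Bool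
  | [], _, _ => true
  | letter :: rest, foundFirst, foundSecond =>
    if !foundFirst then
      if String.ofList [letter] == second then false
      else if String.ofList [letter] == first then fbsLoop first second rest true foundSecond
      else fbsLoop first second rest foundFirst foundSecond
    else if !foundSecond then
      if String.ofList [letter] == second then fbsLoop first second rest foundFirst true
      else fbsLoop first second rest foundFirst foundSecond
    else
      if String.ofList [letter] == first then false
      else fbsLoop first second rest foundFirst foundSecond

def first_before_second (s : String) (first : String) (second : String) : Bool :=
  fbsLoop first second s.toList false false

-- ===== PORT B =====
-- chars = list(s) (a list of one-character strings); `x in chars` is List.contains;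
-- chars[::-1] is chars.reverse (PySem.List.slice?_none_none_neg_one); `.index` is
-- PySem.List.index?, exact here because membership was already checked (.getD 0 is never the default).
def first_before_second_alt (s : String) (first : String) (second : String) : Bool :=
  let chars : List String := s.toList.map (fun c => String.ofList [c])
  if !(chars.contains second) then true
  else if !(chars.contains first) then false
  else
    let lastFirst : Int := (chars.length : Int) - 1 - (((PySem.List.index? chars.reverse first).getD 0 : Nat) : Int)
    decide (lastFirst < (((PySem.List.index? chars second).getD 0 : Nat) : Int))

-- ===== PRECONDITION & SPEC =====
def Spec_first_before_second (s : String) (first : String) (second : String) (out : Bool) : Prop := out = first_before_second_alt s first second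
instance (s : String) (first : String) (second : String) (out : Bool) : Decidable (Spec_first_before_second s first second out) := by unfold Spec_first_before_second; infer_instance

-- ===== CLAIM (what is proved, stated in full; the proofs are below) =====
def Claim_equal_first_before_second : Prop := ∀ (s : String) (first : String) (second : String), Dom_first_before_second s first second → Spec_first_before_second s first second (first_before_second s first second)

-- ===== LEMMAS AND PROOFS =====

-- membership of a string in the singleton-char list
theorem mem_map_singleton_iff (l : List Char) (x : String) :
    x ∈ l.map (fun c => String.ofList [c]) ↔ l.any (fun c => String.ofList [c] == x) = true := by
  simp only [List.mem_map, List.any_eq_true, beq_iff_eq]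

-- state (found_first, found_second) = (true, true): false iff a `first` remains
theorem fbsLoop_tt_tt (f s : String) (l : List Char) :
    fbsLoop f s l true true = !(l.any (fun c => String.ofList [c] == f)) := by
  induction l with
  | nil => simp [fbsLoop]
  | cons c rest ih =>
    by_cases h : String.ofList [c] == f <;> simp [fbsLoop, h, ih]

-- state (true, false), no `second` among the remaining letters: returns true
theorem fbsLoop_tt_ff_noS (f s : String) (l : List Char)
    (h : l.all (fun c => !(String.ofList [c] == s)) = true) :
    fbsLoop f s l true false = true := by
  induction l with
  | nil => simp [fbsLoop]
  | cons c rest ih =>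
    simp only [List.all_cons, Bool.and_eq_true, Bool.not_eq_true'] at h
    simp [fbsLoop, h.1, ih h.2]

-- state (false, false), no `second` at all: returns true
theorem fbsLoop_ff_ff_noS (f s : String) (l : List Char)
    (h : l.all (fun c => !(String.ofList [c] == s)) = true) :
    fbsLoop f s l false false = true := by
  induction l with
  | nil => simp [fbsLoop]
  | cons c rest ih =>
    simp only [List.all_cons, Bool.and_eq_true, Bool.not_eq_true'] at h
    by_cases hf : String.ofList [c] == f
    · simp [fbsLoop, h.1, hf, fbsLoop_tt_ff_noS f s rest h.2]
    · simp [fbsLoop, h.1, hf, ih h.2]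

-- state (true, false) on pre ++ c :: suf where pre has no `second` and c is a `second`
theorem fbsLoop_tt_ff_split (f s : String) (pre : List Char) (c : Char) (suf : List Char)
    (hpre : pre.all (fun c => !(String.ofList [c] == s)) = true) (hc : String.ofList [c] == s) :
    fbsLoop f s (pre ++ c :: suf) true false = !(suf.any (fun c => String.ofList [c] == f)) := by
  induction pre with
  | nil => simp [fbsLoop, hc, fbsLoop_tt_tt]
  | cons p pre' ih =>
    simp only [List.all_cons, Bool.and_eq_true, Bool.not_eq_true'] at hpre
    simp [fbsLoop, hpre.1, ih hpre.2]

-- the value of A's machine when `second` occurs: a `first` before it, none after it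
theorem fbsLoop_ff_ff_split (f s : String) (pre : List Char) (c : Char) (suf : List Char)
    (hpre : pre.all (fun c => !(String.ofList [c] == s)) = true) (hc : String.ofList [c] == s) :
    fbsLoop f s (pre ++ c :: suf) false false =
      (pre.any (fun c => String.ofList [c] == f) && !(suf.any (fun c => String.ofList [c] == f))) := by
  induction pre with
  | nil => simp [fbsLoop, hc]
  | cons p pre' ih =>
    simp only [List.all_cons, Bool.and_eq_true, Bool.not_eq_true'] at hpre
    by_cases hf : String.ofList [p] == f
    · simp [fbsLoop, hpre.1, hf, fbsLoop_tt_ff_split f s pre' c suf hpre.2 hc]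
    · simp [fbsLoop, hpre.1, hf, ih hpre.2]

-- index? over an append whose prefix misses the value
theorem index?_append_not_mem {α : Type} [BEq α] [LawfulBEq α] (pre t : List α) (v : α)
    (h : v ∉ pre) : PySem.List.index? (pre ++ t) v = (PySem.List.index? t v).map (· + pre.length) := by
  induction pre with
  | nil => simp
  | cons p pre' ih =>
    have hp : p ≠ v := fun he => h (he ▸ List.mem_cons_self)
    have h' : v ∉ pre' := fun hm => h (List.mem_cons_of_mem _ hm)
    rw [List.cons_append, PySem.List.index?_cons_of_ne _ hp, ih h']
    cases PySem.List.index? t v with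
    | none => simp
    | some k => simp; omega

-- split a list at its first letter satisfying the property
theorem exists_split_of_any {α : Type} (p : α → Bool) (l : List α) (h : l.any p = true) :
    ∃ pre c suf, l = pre ++ c :: suf ∧ pre.all (fun x => !(p x)) = true ∧ p c = true := by
  induction l with
  | nil => simp at h
  | cons a l' ih =>
    by_cases ha : p a
    · exact ⟨[], a, l', by simp, by simp, ha⟩
    · simp only [List.any_cons, ha, Bool.false_or] at h
      obtain ⟨pre, c, suf, hl, hall, hc⟩ := ih h
      exact ⟨a :: pre, c, suf, by simp [hl], by simp [ha, hall], hc⟩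

-- ===== VERDICT (by name: the statement is the Claim_ definition above) =====
theorem first_before_second_spec : Claim_equal_first_before_second := by
  intro s f sec _
  show first_before_second s f sec = first_before_second_alt s f sec
  simp only [first_before_second, first_before_second_alt]
  set l := s.toList with hl
  set g : Char → String := fun c => String.ofList [c] with hg
  by_cases hS : l.any (fun c => String.ofList [c] == sec) = true
  · -- `second` occurs: split l at its first occurrence
    obtain ⟨pre, c, suf, hsplit, hpre, hc⟩ := exists_split_of_any _ l hS
    rw [hsplit, fbsLoop_ff_ff_split f sec pre c suf hpre hc]
    have hgc : g c = sec := by simpa [hg] using hc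
    have hcontS : ((pre ++ c :: suf).map g).contains sec = true := by
      rw [List.contains_iff_mem]
      exact List.mem_map.mpr ⟨c, by simp, hgc⟩
    have hc1 : ¬((!(((pre ++ c :: suf).map g).contains sec)) = true) := by rw [hcontS]; decide
    have hpre' : sec ∉ pre.map g := by
      rw [mem_map_singleton_iff]
      simp only [List.all_eq_true, Bool.not_eq_true'] at hpre
      simp only [List.any_eq_true, not_exists]
      intro x hx
      exact absurd hx.2 (by simp [hpre x hx.1])
    have hidxS : PySem.List.index? ((pre ++ c :: suf).map g) sec = some pre.length := by
      rw [PySem.List.index?_eq_some_iff]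
      exact ⟨pre.map g, suf.map g, by simp [hgc], by simp, hpre'⟩
    have hlen : ((pre ++ c :: suf).map g).length = pre.length + suf.length + 1 := by
      simp; omega
    by_cases hF : ((pre ++ c :: suf).map g).contains f
    · have hrev : ((pre ++ c :: suf).map g).reverse = (suf.map g).reverse ++ sec :: (pre.map g).reverse := by
        simp [hgc]
      by_cases hFsuf : suf.any (fun c => String.ofList [c] == f) = true
      · -- a `first` after the first `second`: both sides are false
        have hfs : f ∈ (suf.map g).reverse := by
          rw [List.mem_reverse, mem_map_singleton_iff]; exact hFsuf
        obtain ⟨k, hk⟩ := Option.isSome_iff_exists.mp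
          ((PySem.List.index?_isSome_iff ((suf.map g).reverse) f).mpr hfs)
        have hklt : k < suf.length := by
          obtain ⟨hlt, -, -⟩ := PySem.List.getElem_of_index?_eq_some hk
          simpa using hlt
        rw [hrev, PySem.List.index?_append_of_mem _ hfs, hk, hidxS,
          if_neg hc1, if_neg (by rw [hF]; decide)]
        simp only [Option.getD_some, hFsuf, Bool.not_true, Bool.and_false, hlen]
        symm; rw [decide_eq_false_iff_not]; push_cast; omega
      · by_cases hfsec : f = sec
        · -- f IS the `second`: its last index is the first `second` position; both sides false
          subst hfsec
          have hfnprev : f ∉ (suf.map g).reverse := by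
            rw [List.mem_reverse, mem_map_singleton_iff]; simp [hFsuf]
          have hidxR : PySem.List.index? (((pre ++ c :: suf)).map g).reverse f = some suf.length := by
            rw [hrev, index?_append_not_mem _ _ _ hfnprev, PySem.List.index?_cons_self]
            simp
          have hpreF : pre.any (fun c => String.ofList [c] == f) = false := by
            rw [← Bool.not_eq_true, ← mem_map_singleton_iff]; exact hpre'
          rw [hidxR, hidxS, if_neg hc1, if_neg (by rw [hF]; decide)]
          simp only [Option.getD_some, hpreF, Bool.false_and, hlen]
          symm; rw [decide_eq_false_iff_not]; push_cast; omega
        · -- f ≠ sec, no f after the first sec: f occurs in pre, its last index is below pre.length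
          have hfnprev : f ∉ (suf.map g).reverse := by
            rw [List.mem_reverse, mem_map_singleton_iff]; simp [hFsuf]
          have hfpre : f ∈ (pre.map g).reverse := by
            have hm : f ∈ (pre ++ c :: suf).map g := List.contains_iff_mem.mp hF
            simp only [List.map_append, List.map_cons, List.mem_append, List.mem_cons] at hm
            rw [List.mem_reverse]
            rcases hm with h1 | h2 | h3
            · exact h1
            · exact absurd (h2.trans hgc) hfsec
            · exact absurd ((mem_map_singleton_iff suf f).mp h3) (by simp [hFsuf])
          obtain ⟨k, hk⟩ := Option.isSome_iff_exists.mp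
            ((PySem.List.index?_isSome_iff ((pre.map g).reverse) f).mpr hfpre)
          have hklt : k < pre.length := by
            obtain ⟨hlt, -, -⟩ := PySem.List.getElem_of_index?_eq_some hk
            simpa using hlt
          have hidxR : PySem.List.index? (((pre ++ c :: suf)).map g).reverse f =
              some (suf.length + 1 + k) := by
            rw [hrev, index?_append_not_mem _ _ _ hfnprev,
              PySem.List.index?_cons_of_ne _ (fun he => hfsec he.symm), hk]
            simp; omega
          have hpreF : pre.any (fun c => String.ofList [c] == f) = true := by
            rw [← mem_map_singleton_iff, ← List.mem_reverse]; exact hfpre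
          rw [hidxR, hidxS, if_neg hc1, if_neg (by rw [hF]; decide)]
          simp only [Option.getD_some, hpreF, hFsuf, Bool.not_false, Bool.true_and, hlen]
          symm; rw [decide_eq_true_iff]; push_cast; omega
    · -- `second` occurs but `first` does not occur at all: both sides false
      have hFf : ((pre ++ c :: suf).map g).contains f = false := by
        simpa using hF
      have hpreF : pre.any (fun c => String.ofList [c] == f) = false := by
        rw [← Bool.not_eq_true, ← mem_map_singleton_iff]
        intro hm
        exact hF (List.contains_iff_mem.mpr
          (by simp only [List.map_append]; exact List.mem_append.mpr (Or.inl hm)))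
      rw [if_neg hc1, if_pos (by rw [hFf]; decide)]
      simp [hpreF]
  · -- no `second` anywhere: A returns true, B's first test fires
    have hA := fbsLoop_ff_ff_noS f sec l (by
      simp only [List.all_eq_true, Bool.not_eq_true']
      intro c hcl
      by_contra hcc
      exact hS (List.any_eq_true.mpr ⟨c, hcl, by simpa using hcc⟩))
    have hB : (l.map g).contains sec = false := by
      rw [← Bool.not_eq_true, List.contains_iff_mem, mem_map_singleton_iff]; simp [hS]
    rw [hA, hB, if_pos (by simp)]
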